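-- pv_equiv track=rewrite | github.com/Maddallena/dswp_wprowadzenie_python | kolokwium/omowienie_kolokwium.py | zadanie_6
-- ===== SOURCE A (Python) =====
-- def zadanie_6(tekst: str, max_dlugosc: int):
--     wyrazy = tekst.split(' ')
--     output = ''
--     for wyraz in wyrazy:
--         if len(output + wyraz) > max_dlugosc:
--             return output
--         else:
--             output += wyraz
-- ===== SOURCE B (Python) =====
-- def zadanie_6(tekst: str, max_dlugosc: int):
--     # Prefix-sum table of word lengths, then a separate search pass + slice/join.
--     wyrazy = tekst.split(' ')
--     cum = []
--     total = 0
--     for w in wyrazy: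
--         total += len(w)
--         cum.append(total)
--     for i, c in enumerate(cum):
--         if c > max_dlugosc:
--             return ''.join(wyrazy[:i])
-- ===== Notes on version B (the rewrite author's own statement) =====
-- stated objective: alternative
-- what changed: A grows a string while scanning and returns it at the first overflow; B first builds a cumulative-length table of the words, then searches that table for the first index exceeding max and returns ''.join of the word slice before it.
-- outside the precondition, e.g. on zadanie_6('ab', 5): A returns None, B returns None
import Mathlib
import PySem

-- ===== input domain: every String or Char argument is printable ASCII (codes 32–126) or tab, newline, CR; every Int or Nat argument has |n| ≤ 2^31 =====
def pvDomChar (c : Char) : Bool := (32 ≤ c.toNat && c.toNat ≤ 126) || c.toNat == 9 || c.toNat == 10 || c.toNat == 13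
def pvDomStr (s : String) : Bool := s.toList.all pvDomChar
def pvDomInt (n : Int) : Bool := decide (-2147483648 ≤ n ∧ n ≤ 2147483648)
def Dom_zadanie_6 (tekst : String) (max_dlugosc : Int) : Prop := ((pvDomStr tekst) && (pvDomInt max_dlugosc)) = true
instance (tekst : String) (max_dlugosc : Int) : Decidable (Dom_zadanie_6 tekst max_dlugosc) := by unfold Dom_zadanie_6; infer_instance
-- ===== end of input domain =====

-- B replaces A's running string-concatenation loop with a prefix-sum table of word
-- lengths, a separate first-overflow search over that table, and a slice+join (objective: alternative decomposition).


-- ===== PORT A =====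
-- A's loop with early return: Option (List Char) result, none = Python's implicit `return None`.
def zadanie6Loop (ws : List (List Char)) (out : List Char) (m : Int) : Option (List Char) :=
  match ws with
  | [] => none
  | w :: rest => if m < ((out ++ w).length : Int) then some out else zadanie6Loop rest (out ++ w) m

def zadanie_6 (tekst : String) (max_dlugosc : Int) : String :=
  let wyrazy := PySem.Chars.splitOn tekst.toList [' ']
  match zadanie6Loop wyrazy [] max_dlugosc with
  | some out => String.ofList out
  | none => ""   -- Python returns None here; excluded by Pre_zadanie_6

-- ===== PORT B =====
-- cumulative-length table (Source B's first loop)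
def zadanie6Cum (ws : List (List Char)) (total : Int) : List Int :=
  match ws with
  | [] => []
  | w :: rest => (total + (w.length : Int)) :: zadanie6Cum rest (total + (w.length : Int))

-- first index whose cumulative length overflows (Source B's second loop)
def zadanie6Find (cs : List Int) (m : Int) (i : Nat) : Option Nat :=
  match cs with
  | [] => none
  | c :: rest => if m < c then some i else zadanie6Find rest m (i + 1)

def zadanie_6_alt (tekst : String) (max_dlugosc : Int) : String :=
  let wyrazy := PySem.Chars.splitOn tekst.toList [' ']
  match zadanie6Find (zadanie6Cum wyrazy 0) max_dlugosc 0 with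
  | some i => String.ofList (PySem.Chars.join [] (wyrazy.take i))
  | none => ""   -- Python returns None here; excluded by Pre_zadanie_6

-- ===== PRECONDITION & SPEC =====
-- Pre_ excludes exactly the inputs where the words all fit (total word length ≤ max_dlugosc):
-- there Python A falls off the loop and returns None, which is not a str.
def Pre_zadanie_6 (tekst : String) (max_dlugosc : Int) : Prop :=
  max_dlugosc < ((PySem.Chars.splitOn tekst.toList [' ']).map (fun w => (w.length : Int))).sum
instance (tekst : String) (max_dlugosc : Int) : Decidable (Pre_zadanie_6 tekst max_dlugosc) := by
  unfold Pre_zadanie_6; infer_instance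

def pvWitness_zadanie_6 : String × Int := ("abcd ef", 3)

def Spec_zadanie_6 (tekst : String) (max_dlugosc : Int) (out : String) : Prop := out = zadanie_6_alt tekst max_dlugosc
instance (tekst : String) (max_dlugosc : Int) (out : String) : Decidable (Spec_zadanie_6 tekst max_dlugosc out) := by unfold Spec_zadanie_6; infer_instance

-- ===== CLAIM (what is proved, stated in full; the proofs are below) =====
def Claim_equal_zadanie_6 : Prop := ∀ (tekst : String) (max_dlugosc : Int), Dom_zadanie_6 tekst max_dlugosc → Pre_zadanie_6 tekst max_dlugosc → Spec_zadanie_6 tekst max_dlugosc (zadanie_6 tekst max_dlugosc)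

-- ===== LEMMAS AND PROOFS =====

theorem join_nil_cons (w : List Char) (l : List (List Char)) :
    PySem.Chars.join [] (w :: l) = w ++ PySem.Chars.join [] l := by
  cases l with
  | nil => simp [PySem.Chars.join_singleton, PySem.Chars.join_nil]
  | cons q rest => rw [PySem.Chars.join_cons_cons]; simp

theorem zadanie6Find_shift (cs : List Int) (m : Int) (i : Nat) :
    zadanie6Find cs m i = (zadanie6Find cs m 0).map (· + i) := by
  induction cs generalizing i with
  | nil => simp [zadanie6Find]
  | cons c rest ih =>
    simp only [zadanie6Find]
    split_ifs with h
    · simp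
    · rw [ih (i + 1), ih 1]
      cases zadanie6Find rest m 0 <;> simp
      omega

theorem zadanie6_main (ws : List (List Char)) (out : List Char) (m : Int) :
    zadanie6Loop ws out m =
      (zadanie6Find (zadanie6Cum ws (out.length : Int)) m 0).map
        (fun i => out ++ PySem.Chars.join [] (ws.take i)) := by
  induction ws generalizing out with
  | nil => simp [zadanie6Loop, zadanie6Cum, zadanie6Find]
  | cons w rest ih =>
    simp only [zadanie6Loop, zadanie6Cum, zadanie6Find]
    have hlen : (((out ++ w).length : Int)) = (out.length : Int) + (w.length : Int) := by
      simp [List.length_append]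
    rw [hlen]
    split_ifs with h
    · simp [PySem.Chars.join_nil]
    · rw [zadanie6Find_shift _ m 1, ih (out ++ w), hlen]
      cases zadanie6Find (zadanie6Cum rest ((out.length : Int) + (w.length : Int))) m 0 with
      | none => simp
      | some i =>
        simp [List.take_succ_cons, join_nil_cons, List.append_assoc]

-- ===== VERDICT (by name: the statement is the Claim_ definition above) =====
theorem zadanie_6_spec : Claim_equal_zadanie_6 := by
  intro tekst m _ _
  unfold Spec_zadanie_6 zadanie_6 zadanie_6_alt
  simp only []
  have h := zadanie6_main (PySem.Chars.splitOn tekst.toList [' ']) [] m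
  simp only [List.length_nil, Int.natCast_zero] at h
  rw [h]
  cases zadanie6Find (zadanie6Cum (PySem.Chars.splitOn tekst.toList [' ']) 0) m 0 <;> simp
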